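-- pv_equiv track=rewrite | github.com/matanassif/OmegaCalculator | Convertion.py | shorten_tilda
-- ===== SOURCE A (Python) =====
-- def shorten_tilda(expression: list) -> list:
--     """
--     Shorten a sequence of tildas to one or zero
--     :param expression: The mathematical expression which every unary minus becomes a tilda
--     :return: The mathematical expression which the sequences of tildas are shorten to one or zero
--     """
--     # The expression without sequences of tildas after conversion of minuses to tildas
--     no_tilda_sequences = list()
--     expression_index = 0
--
--     while expression_index < len(expression):
--         if expression[expression_index] == '~':
--             tilda_counter = 0
--
--             # Counts the tildas
--             while expression_index < len(expression) and expression[expression_index] == '~':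
--                 tilda_counter += 1
--                 expression_index += 1
--
--             # Inserts one tilda if the count is odd, otherwise does not insert anything
--             expression_index -= 1
--             if tilda_counter % 2 != 0:
--                 no_tilda_sequences.append('~')
--
--         # Adds every element which is not a tilda
--         else:
--             no_tilda_sequences.append(expression[expression_index])
--
--         expression_index += 1
--
--     return no_tilda_sequences
-- ===== SOURCE B (Python) =====
-- def shorten_tilda(expression: list) -> list:
--     """
--     Shorten a sequence of tildas to one or zero.
--     Single pass with a parity flag: instead of counting each tilde run with an
--     inner loop, toggle a boolean per tilde and flush one '~' when the run ends
--     on an odd parity.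
--     """
--     result = []
--     pending_tilda = False
--     for token in expression:
--         if token == '~':
--             pending_tilda = not pending_tilda
--         else:
--             if pending_tilda:
--                 result.append('~')
--                 pending_tilda = False
--             result.append(token)
--     if pending_tilda:
--         result.append('~')
--     return result
-- ===== Notes on version B (the rewrite author's own statement) =====
-- stated objective: simpler
-- what changed: Replaced the index/inner-while run-counting walk with a single for-loop over tokens carrying a boolean parity flag that is toggled per tilde and flushed when a run ends.
import Mathlib
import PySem

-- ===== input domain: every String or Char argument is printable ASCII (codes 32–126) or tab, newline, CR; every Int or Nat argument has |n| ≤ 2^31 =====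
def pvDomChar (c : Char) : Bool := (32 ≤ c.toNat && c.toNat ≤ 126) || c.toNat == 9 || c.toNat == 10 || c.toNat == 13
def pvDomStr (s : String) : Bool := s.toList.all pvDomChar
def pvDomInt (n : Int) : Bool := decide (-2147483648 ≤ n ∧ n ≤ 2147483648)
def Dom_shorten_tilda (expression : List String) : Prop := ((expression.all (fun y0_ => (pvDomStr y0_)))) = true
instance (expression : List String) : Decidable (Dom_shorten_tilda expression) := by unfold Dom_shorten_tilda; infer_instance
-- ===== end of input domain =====

-- B replaces A's index walk with an inner run-counting while by a single pass
-- carrying a parity flag (objective: simpler; same O(n) cost).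

-- ===== PORT A =====
-- inner while loop: counts consecutive '~' starting at index i
def tildaCount (expression : List String) (i : Nat) : Nat :=
  if _h : i < expression.length ∧ expression.getD i "" = "~" then
    1 + tildaCount expression (i + 1)
  else 0
termination_by expression.length - i

theorem tildaCount_pos (expression : List String) (i : Nat)
    (h1 : i < expression.length) (h2 : expression.getD i "" = "~") :
    0 < tildaCount expression i := by
  rw [tildaCount, dif_pos ⟨h1, h2⟩]; omega

-- outer while loop of A; acc is no_tilda_sequences
def aLoop (expression : List String) (i : Nat) (acc : List String) : List String :=
  if h : i < expression.length then
    if ht : expression.getD i "" = "~" then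
      -- inner while counted the run; index ends at i + count (after -=1 then +=1)
      let c := tildaCount expression i
      aLoop expression (i + c) (if c % 2 ≠ 0 then acc ++ ["~"] else acc)
    else
      aLoop expression (i + 1) (acc ++ [expression.getD i ""])
  else acc
termination_by expression.length - i
decreasing_by
  · have := tildaCount_pos expression i h ht; omega
  · omega

def shorten_tilda (expression : List String) : List String :=
  aLoop expression 0 []

-- ===== PORT B =====
-- one step of B's for-loop: state = (result, pending_tilda)
def altStep (st : List String × Bool) (token : String) : List String × Bool :=
  if token = "~" then (st.1, !st.2)
  else ((if st.2 then st.1 ++ ["~"] else st.1) ++ [token], false)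

-- final flush after the loop
def altFinish (st : List String × Bool) : List String :=
  if st.2 then st.1 ++ ["~"] else st.1

def shorten_tilda_alt (expression : List String) : List String :=
  altFinish (expression.foldl altStep ([], false))

-- ===== PRECONDITION & SPEC =====
def Spec_shorten_tilda (expression : List String) (out : List String) : Prop := out = shorten_tilda_alt expression
instance (expression : List String) (out : List String) : Decidable (Spec_shorten_tilda expression out) := by unfold Spec_shorten_tilda; infer_instance

-- ===== CLAIM (what is proved, stated in full; the proofs are below) =====
def Claim_equal_shorten_tilda : Prop := ∀ (expression : List String), Dom_shorten_tilda expression → Spec_shorten_tilda expression (shorten_tilda expression)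

-- ===== LEMMAS AND PROOFS =====

-- B's run over the suffix, with explicit start state
def bRun (xs : List String) (acc : List String) (p : Bool) : List String :=
  altFinish (xs.foldl altStep (acc, p))

theorem bRun_nil (acc : List String) (p : Bool) :
    bRun [] acc p = if p then acc ++ ["~"] else acc := rfl

theorem bRun_tilda (xs : List String) (acc : List String) (p : Bool) :
    bRun ("~" :: xs) acc p = bRun xs acc (!p) := by
  simp [bRun, altStep]

theorem bRun_other (x : String) (hx : x ≠ "~") (xs : List String) (acc : List String) (p : Bool) :
    bRun (x :: xs) acc p = bRun xs ((if p then acc ++ ["~"] else acc) ++ [x]) false := by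
  simp [bRun, altStep, hx]

-- after the counted run, the next element (if any) is not a tilde
theorem tildaCount_post (expression : List String) (i : Nat) :
    ¬ (i + tildaCount expression i < expression.length ∧
       expression.getD (i + tildaCount expression i) "" = "~") := by
  fun_induction tildaCount expression i with
  | case1 i h ih =>
      have harith : i + (1 + tildaCount expression (i + 1)) = (i + 1) + tildaCount expression (i + 1) := by omega
      rw [harith]
      exact ih
  | case2 i h =>
      simpa using h

-- consuming the counted tilde run only toggles the parity
theorem bRun_tildaRun (expression : List String) (i : Nat) :
    ∀ (acc : List String) (p : Bool),
      bRun (expression.drop i) acc p =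
        bRun (expression.drop (i + tildaCount expression i)) acc
          (p ^^ decide (tildaCount expression i % 2 = 1)) := by
  fun_induction tildaCount expression i with
  | case1 i h ih =>
      intro acc p
      obtain ⟨hlt, heq⟩ := h
      have hdrop : expression.drop i = expression.getD i "" :: expression.drop (i + 1) := by
        rw [List.getD_eq_getElem _ _ hlt]
        exact List.drop_eq_getElem_cons hlt
      rw [hdrop, heq, bRun_tilda, ih acc (!p)]
      have harith : i + (1 + tildaCount expression (i + 1)) = (i + 1) + tildaCount expression (i + 1) := by omega
      rw [harith]
      congr 1
      rcases Nat.even_or_odd (tildaCount expression (i + 1)) with he | ho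
      · have h1 : tildaCount expression (i + 1) % 2 = 0 := Nat.even_iff.mp he
        have h2 : (1 + tildaCount expression (i + 1)) % 2 = 1 := by omega
        simp [h1, h2]
      · have h1 : tildaCount expression (i + 1) % 2 = 1 := Nat.odd_iff.mp ho
        have h2 : (1 + tildaCount expression (i + 1)) % 2 = 0 := by omega
        simp [h1, h2]
  | case2 i h =>
      intro acc p
      simp

-- flush: when the remaining suffix does not start with a tilde, the pending
-- parity can be folded into the accumulator
theorem bRun_flush (expression : List String) (j : Nat)
    (hpost : ¬ (j < expression.length ∧ expression.getD j "" = "~"))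
    (acc : List String) (p : Bool) :
    bRun (expression.drop j) acc p =
      bRun (expression.drop j) (if p then acc ++ ["~"] else acc) false := by
  by_cases hj : j < expression.length
  · have hne : expression.getD j "" ≠ "~" := fun hc => hpost ⟨hj, hc⟩
    have hdrop : expression.drop j = expression.getD j "" :: expression.drop (j + 1) := by
      rw [List.getD_eq_getElem _ _ hj]
      exact List.drop_eq_getElem_cons hj
    rw [hdrop, bRun_other _ hne, bRun_other _ hne]
    simp
  · have : expression.drop j = [] := List.drop_eq_nil_of_le (by omega)
    rw [this, bRun_nil, bRun_nil]
    simp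

theorem aLoop_eq_bRun (expression : List String) (i : Nat) (acc : List String) :
    aLoop expression i acc = bRun (expression.drop i) acc false := by
  fun_induction aLoop expression i acc with
  | case1 i acc h ht c ih =>
      rw [bRun_tildaRun, bRun_flush expression _ (tildaCount_post expression i)]
      simp only [dite_eq_ite] at ih
      rw [ih]
      congr 1
      rcases Nat.even_or_odd (tildaCount expression i) with he | ho
      · have h1 : tildaCount expression i % 2 = 0 := Nat.even_iff.mp he
        simp [h1]
        exact h1
      · have h1 : tildaCount expression i % 2 = 1 := Nat.odd_iff.mp ho
        simp [h1]
        exact h1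
  | case2 i acc h ht ih =>
      have hdrop : expression.drop i = expression.getD i "" :: expression.drop (i + 1) := by
        rw [List.getD_eq_getElem _ _ h]
        exact List.drop_eq_getElem_cons h
      rw [hdrop, bRun_other _ ht, ih]
      simp
  | case3 i acc h =>
      have : expression.drop i = [] := List.drop_eq_nil_of_le (by omega)
      rw [this, bRun_nil]
      simp

-- ===== VERDICT (by name: the statement is the Claim_ definition above) =====
theorem shorten_tilda_spec : Claim_equal_shorten_tilda := by
  intro expression _
  unfold Spec_shorten_tilda shorten_tilda shorten_tilda_alt
  simpa [bRun] using aLoop_eq_bRun expression 0 []
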